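/- GENERATED by mk_final_copies.py from the proof of the farm's unit `start_decoder.C4d` (farm:start_decoder.C4d.1: Proof.lean) as the
   re-elaboration sweep compiled it — do not edit. -/
import Asan.CheckWalk
import Vorbis.Spec.Units.start_decoder_C4d

open X86 X86.User Asan Vorbis Vorbis.Spec Vorbis.Spec.StartDecoder

set_option maxRecDepth 4000
set_option maxHeartbeats 4000000

namespace Vorbis.Spec.start_decoder_C4d

/-- **Segment C4d of `start_decoder`** (`cut124` 0x114820 `jmp 113b22`): the state after `error` returned 0 reaches the single
epilogue `AtERR` with eax = 0 and `Failed`. One instruction; memory and registers are unchanged, so `Frame` is carried field by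
field with the new program counter. -/
theorem segC4d_walk {Lay : Layout} (hLay : Lay.hi = 0x1000000) {μ : Microarch} (hμ : UserX.MicroOK μ) {u₀ : State}
    (hcode : HasCodeNat Lay u₀ Vorbis.L.start_decoder.entry Vorbis.Code.code_start_decoder.nat Vorbis.L.start_decoder.size)
    {g : Ghost} {A : Arena × List Obj} {v : State} (hat : InC4Err u₀ g A v) :
    ReachVia Lay μ WayInv v (fun w => AtERR u₀ g w) := by
  have hfr := hat.frame
  have he := hfr.entry
  v_entry he
  simp only [depth] at he_room he_stack
  have w_rip := hfr.rip
  have w_eq : Mem.EqOn Vorbis.L.textLo Vorbis.L.textHi u₀.mem v.mem := hfr.code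
  have hdf : v.flags .df = false := (show abiInv _ from hfr.inv).1
  have hmx : v.mxcsr &&& 0x1F80 = 0x1F80 := (show abiInv _ from hfr.inv).2
  have hsse := Vorbis.sseOK_of_abiInv hfr.inv
  u_walk hcode [hμ.vendor] until [Vorbis.L.start_decoder.cut4] span [Vorbis.L.textLo, Vorbis.L.textHi] side (v_side)
  -- 0x114820 `jmp 113b22`: the registers and the memory are those of `v`
  have hrax : s_114820.reg .rax = v.reg .rax := w_kept .rax rfl
  have hrsp : s_114820.reg .rsp = v.reg .rsp := w_kept .rsp rfl
  have habi : abiInv s_114820 := by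
    refine Vorbis.abiInv_of ?_ ?_
    · rw [w_flags]
      exact hdf
    · rw [w_mxcsr]
      exact hmx
  have hfr' : Frame u₀ g pc_ERR A s_114820 :=
    { entry := hfr.entry
      rip := w_rip
      rsp := by rw [hrsp]; exact hfr.rsp
      shadowIdx := by rw [w_mem]; exact hfr.shadowIdx
      saved_rbx := by rw [w_mem]; exact hfr.saved_rbx
      saved_rbp := by rw [w_mem]; exact hfr.saved_rbp
      saved_r12 := by rw [w_mem]; exact hfr.saved_r12
      saved_r13 := by rw [w_mem]; exact hfr.saved_r13
      saved_r14 := by rw [w_mem]; exact hfr.saved_r14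
      saved_r15 := by rw [w_mem]; exact hfr.saved_r15
      saved_ra := by rw [w_mem]; exact hfr.saved_ra
      code := by rw [w_mem]; exact hfr.code
      inv := habi
      shadow := by rw [w_mem]; exact hfr.shadow
      offText := hfr.offText
      ext := hfr.ext
      callers := hfr.callers
      sh7 := by rw [w_mem]; exact hfr.sh7
      same := by rw [w_mem]; exact hfr.same }
  have hax : (s_114820.reg .rax).toNat % 2 ^ 32 = 0 := by
    rw [hrax]
    exact hat.rax0
  have hfail : Failed g.len g.f (g.Live A) A s_114820.mem := by
    rw [w_mem]
    exact hat.failed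
  exact ReachVia.done ⟨A, hfr', hat.hand, Or.inl ⟨hax, hfail⟩⟩

end Vorbis.Spec.start_decoder_C4d

/-- The unit `start_decoder.C4d`: `segC4d_walk` at every entry state. -/
theorem Vorbis.Spec.Worked.start_decoder_C4d_ok : Vorbis.Spec.start_decoder_C4d.Statement := by
  intro Lay hLay μ hμ u₀ hcode g A v hat
  exact Vorbis.Spec.start_decoder_C4d.segC4d_walk hLay hμ hcode hat
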